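-- pv_equiv track=rewrite | github.com/EarthOnline/AdventOfCode | 2021/day_15.py | expand_cave
-- ===== SOURCE A (Python) =====
-- from itertools import product, chain
--
-- def expand_cave(cave, size):
--     max_x = max(x for x, y in cave.keys()) + 1
--     max_y = max(y for x, y in cave.keys()) + 1
--     first_cave = [list(chain.from_iterable([(cave[(x, y)] + r - 1) % 9 + 1 for x in range(max_x)]
--                                            for r in range(size))) for y in range(max_y)]
--
--     for r in range(size):
--         for line in first_cave:
--             yield [(x + r - 1) % 9 + 1 for x in line]
-- ===== SOURCE B (Python) =====
-- def expand_cave(cave, size):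
--     max_x = max(x for x, y in cave.keys()) + 1
--     max_y = max(y for x, y in cave.keys()) + 1
--     if size <= 0:
--         return
--
--     def bump(row):
--         return [v % 9 + 1 for v in row]
--
--     rows = []
--     for y in range(max_y):
--         seg = bump([cave[(x, y)] - 1 for x in range(max_x)])
--         row = []
--         for _ in range(size):
--             row += seg
--             seg = bump(seg)
--         rows.append(row)
--
--     for _ in range(size):
--         for row in rows:
--             yield row
--         rows = [bump(row) for row in rows]
-- ===== Notes on version B (the rewrite author's own statement) =====
-- stated objective: alternative
-- what changed: B replaces A's offset arithmetic ((v+r-1)%9+1 recomputed per tile from an intermediate first_cave grid) with iterated successor tiling: it normalizes each original row once, then builds the wide row by repeatedly appending a bump()-ed (wrap-around +1) copy, and tiles vertically by repeatedly bump()-ing the whole row list.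
import Mathlib
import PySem

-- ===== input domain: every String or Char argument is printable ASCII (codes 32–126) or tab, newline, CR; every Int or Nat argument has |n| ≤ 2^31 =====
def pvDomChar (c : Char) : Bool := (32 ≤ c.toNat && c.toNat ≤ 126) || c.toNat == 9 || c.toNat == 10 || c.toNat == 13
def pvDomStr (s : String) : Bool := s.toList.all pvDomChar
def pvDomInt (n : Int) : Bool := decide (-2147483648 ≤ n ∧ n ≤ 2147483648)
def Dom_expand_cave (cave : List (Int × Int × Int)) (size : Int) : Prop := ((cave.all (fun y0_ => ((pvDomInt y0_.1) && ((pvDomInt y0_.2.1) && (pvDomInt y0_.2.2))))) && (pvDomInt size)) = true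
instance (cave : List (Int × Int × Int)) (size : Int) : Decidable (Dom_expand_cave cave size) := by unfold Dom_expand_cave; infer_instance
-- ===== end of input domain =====

-- B replaces A's offset arithmetic and intermediate grid with iterated wrap-around "bump" tiling (simpler decomposition).
-- Shared helpers: dict lookup by key (x, y) (first match) and the max-key computations both Pythons perform.
def pvLookup (cave : List (Int × Int × Int)) (x y : Int) : Int :=
  ((cave.find? (fun e => e.1 == x && e.2.1 == y)).map (·.2.2)).getD 0

def pvMaxX (cave : List (Int × Int × Int)) : Int :=
  (PySem.List.max? (cave.map (·.1)) (fun v => v)).getD 0 + 1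

def pvMaxY (cave : List (Int × Int × Int)) : Int :=
  (PySem.List.max? (cave.map (·.2.1)) (fun v => v)).getD 0 + 1

-- ===== PORT A =====
def expand_cave (cave : List (Int × Int × Int)) (size : Int) : List (List Int) :=
  let max_x := pvMaxX cave
  let max_y := pvMaxY cave
  let first_cave : List (List Int) :=
    (PySem.List.pyRange 0 max_y 1).map (fun y =>
      ((PySem.List.pyRange 0 size 1).map (fun r =>
        (PySem.List.pyRange 0 max_x 1).map (fun x =>
          PySem.Int.mod (pvLookup cave x y + r - 1) 9 + 1))).flatten)
  (PySem.List.pyRange 0 size 1).flatMap (fun r =>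
    first_cave.map (fun line => line.map (fun x => PySem.Int.mod (x + r - 1) 9 + 1)))

-- ===== PORT B =====
-- bump(row): every cell stepped one risk level with wrap-around 9 -> 1.
def pvBump (row : List Int) : List Int := row.map (fun v => PySem.Int.mod v 9 + 1)

-- row += seg; seg = bump(seg), repeated `size` times (horizontal tiling by iterated bump).
def pvHTile : Nat → List Int → List Int
  | 0, _ => []
  | n + 1, seg => seg ++ pvHTile n (pvBump seg)

-- yield all rows; rows = [bump(row) for row in rows], repeated `size` times (vertical tiling).
def pvVTile : Nat → List (List Int) → List (List Int)
  | 0, _ => []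
  | n + 1, rows => rows ++ pvVTile n (rows.map pvBump)

def expand_cave_alt (cave : List (Int × Int × Int)) (size : Int) : List (List Int) :=
  let max_x := pvMaxX cave
  let max_y := pvMaxY cave
  if size ≤ 0 then []
  else
    let rows := (PySem.List.pyRange 0 max_y 1).map (fun y =>
      pvHTile size.toNat
        (pvBump ((PySem.List.pyRange 0 max_x 1).map (fun x => pvLookup cave x y - 1))))
    pvVTile size.toNat rows

-- ===== PRECONDITION & SPEC =====
-- Pre_ excludes exactly the inputs where Python A raises: an empty dict (max() raises ValueError),
-- and, when size > 0, a dict missing some key (x, y) with 0 ≤ x < max_x, 0 ≤ y < max_y (KeyError).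
def Pre_expand_cave (cave : List (Int × Int × Int)) (size : Int) : Prop :=
  cave ≠ [] ∧ (0 < size →
    ∀ x ∈ PySem.List.pyRange 0 (pvMaxX cave) 1,
      ∀ y ∈ PySem.List.pyRange 0 (pvMaxY cave) 1,
        (cave.find? (fun e => e.1 == x && e.2.1 == y)).isSome)
instance (cave : List (Int × Int × Int)) (size : Int) : Decidable (Pre_expand_cave cave size) := by
  unfold Pre_expand_cave; infer_instance

def pvWitness_expand_cave : (List (Int × Int × Int)) × Int := ([(0, 0, 5), (1, 0, 9), (0, 1, 1), (1, 1, 2)], 2)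

def Spec_expand_cave (cave : List (Int × Int × Int)) (size : Int) (out : List (List Int)) : Prop := out = expand_cave_alt cave size
instance (cave : List (Int × Int × Int)) (size : Int) (out : List (List Int)) : Decidable (Spec_expand_cave cave size out) := by unfold Spec_expand_cave; infer_instance

-- ===== CLAIM (what is proved, stated in full; the proofs are below) =====
def Claim_equal_expand_cave : Prop := ∀ (cave : List (Int × Int × Int)) (size : Int), Dom_expand_cave cave size → Pre_expand_cave cave size → Spec_expand_cave cave size (expand_cave cave size)

-- ===== LEMMAS AND PROOFS =====
-- elementwise bump composed with a wrap-normalized value advances the offset by one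
theorem pv_mod_step (a : Int) :
    PySem.Int.mod (PySem.Int.mod a 9 + 1) 9 + 1 = PySem.Int.mod (a + 1) 9 + 1 := by
  rw [PySem.Int.mod_eq_emod_of_pos (by norm_num : (0:Int) < 9),
    PySem.Int.mod_eq_emod_of_pos (by norm_num : (0:Int) < 9),
    PySem.Int.mod_eq_emod_of_pos (by norm_num : (0:Int) < 9), Int.emod_add_emod]

theorem pv_iter_mod (r : Nat) (a : Int) :
    (fun v => PySem.Int.mod v 9 + 1)^[r] (PySem.Int.mod a 9 + 1)
      = PySem.Int.mod (a + r) 9 + 1 := by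
  induction r generalizing a with
  | zero => simp
  | succ n ih =>
    rw [Function.iterate_succ_apply, pv_mod_step a, ih (a + 1)]
    congr 2
    push_cast; ring

theorem pvBump_iterate (r : Nat) (l : List Int) :
    pvBump^[r] l = l.map ((fun v => PySem.Int.mod v 9 + 1)^[r]) := by
  induction r generalizing l with
  | zero => simp
  | succ n ih => rw [Function.iterate_succ_apply, ih, pvBump, List.map_map, Function.iterate_succ]

theorem pvHTile_eq (n : Nat) (seg : List Int) :
    pvHTile n seg = (List.range n).flatMap (fun r => pvBump^[r] seg) := by
  induction n generalizing seg with
  | zero => simp [pvHTile]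
  | succ m ih =>
    rw [pvHTile, ih, List.range_succ_eq_map, List.flatMap_cons, List.flatMap_map]
    simp [Function.iterate_succ_apply]

theorem pv_mod_compose (a r : Int) :
    PySem.Int.mod (PySem.Int.mod a 9 + 1 + r - 1) 9 + 1 = PySem.Int.mod (a + r) 9 + 1 := by
  rw [PySem.Int.mod_eq_emod_of_pos (by norm_num : (0:Int) < 9),
    PySem.Int.mod_eq_emod_of_pos (by norm_num : (0:Int) < 9),
    PySem.Int.mod_eq_emod_of_pos (by norm_num : (0:Int) < 9)]
  have h1 : a % 9 + 1 + r - 1 = a % 9 + r := by ring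
  rw [h1, Int.emod_add_emod]

theorem pvVTile_eq (n : Nat) (rows : List (List Int)) :
    pvVTile n rows = (List.range n).flatMap (fun r => rows.map pvBump^[r]) := by
  induction n generalizing rows with
  | zero => simp [pvVTile]
  | succ m ih =>
    rw [pvVTile, ih, List.range_succ_eq_map, List.flatMap_cons, List.flatMap_map]
    simp [List.map_map]

-- horizontal tiling by iterated bump = the offset comprehension
theorem pv_flatMap_funext {a b : Type} (l : List a) {f g : a → List b} (h : ∀ x, f x = g x) :
    l.flatMap f = l.flatMap g := by rw [funext h]

theorem pv_map_funext {a b : Type} (l : List a) {f g : a → b} (h : ∀ x, f x = g x) :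
    l.map f = l.map g := by rw [funext h]

theorem pv_row (n : Nat) (seg : List Int) :
    pvHTile n (pvBump seg)
      = (List.range n).flatMap (fun dx : Nat => seg.map (fun v => PySem.Int.mod (v + (dx : Int)) 9 + 1)) := by
  rw [pvHTile_eq]
  apply pv_flatMap_funext
  intro dx
  rw [← Function.iterate_succ_apply, pvBump_iterate]
  apply pv_map_funext
  intro v
  rw [Function.iterate_succ_apply]
  exact pv_iter_mod dx v

-- common normal form of both programs (proof-only helper)
def pvNorm (cave : List (Int × Int × Int)) (n : Nat) : List (List Int) :=
  (List.range n).flatMap (fun r : Nat =>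
    (PySem.List.pyRange 0 (pvMaxY cave) 1).map (fun y =>
      (List.range n).flatMap (fun dx : Nat =>
        (PySem.List.pyRange 0 (pvMaxX cave) 1).map (fun x =>
          PySem.Int.mod (pvLookup cave x y - 1 + (dx : Int) + (r : Int)) 9 + 1))))

theorem pv_B_norm (cave : List (Int × Int × Int)) (size : Int) (hs : ¬ size ≤ 0) :
    expand_cave_alt cave size = pvNorm cave size.toNat := by
  unfold expand_cave_alt pvNorm
  simp only [if_neg hs]
  rw [pvVTile_eq]
  apply pv_flatMap_funext
  intro r
  rw [List.map_map]
  apply pv_map_funext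
  intro y
  show pvBump^[r] (pvHTile size.toNat (pvBump _)) = _
  rw [pv_row, pvBump_iterate, List.map_flatMap]
  apply pv_flatMap_funext
  intro dx
  simp only [List.map_map]
  apply pv_map_funext
  intro x
  show (fun v => PySem.Int.mod v 9 + 1)^[r] (PySem.Int.mod (pvLookup cave x y - 1 + dx) 9 + 1) = _
  rw [pv_iter_mod]

theorem pv_A_norm (cave : List (Int × Int × Int)) (size : Int) :
    expand_cave cave size = pvNorm cave size.toNat := by
  unfold expand_cave pvNorm
  rw [PySem.List.pyRange_one 0 size]
  simp only [Int.sub_zero, zero_add, List.flatMap_map]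
  apply pv_flatMap_funext
  intro r
  rw [List.map_map]
  apply pv_map_funext
  intro y
  simp only [Function.comp]
  rw [List.map_flatten, List.map_map, List.map_map, List.flatMap_def]
  apply congrArg List.flatten
  apply pv_map_funext
  intro dx
  simp only [Function.comp, List.map_map]
  apply pv_map_funext
  intro x
  simp only [Function.comp]
  rw [pv_mod_compose]
  have h : pvLookup cave x y + (dx : Int) - 1 + r = pvLookup cave x y - 1 + dx + r := by ring
  rw [h]

-- ===== VERDICT (by name: the statement is the Claim_ definition above) =====
theorem expand_cave_spec : Claim_equal_expand_cave := by
  intro cave size _ _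
  unfold Spec_expand_cave
  by_cases hs : size ≤ 0
  · unfold expand_cave expand_cave_alt
    simp [hs, PySem.List.pyRange_one_eq_nil hs]
  · rw [pv_A_norm, pv_B_norm cave size hs]
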